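-- pv_equiv track=rewrite | github.com/Aditya-Bhargav-dev/Ds-Algo | Interview bit/Strings/Vowel and Consonant Substrings.py | solve
-- ===== SOURCE A (Python) =====
-- def solve(A):
--     vowels = ['a','e','i','o','u']
--     vowCount = 0
--     consCount = 0
--     c=0
--     for i in A:
--         if i in vowels:
--             vowCount+=1
--         else:
--             consCount+=1
--     for i in A:
--         if i in vowels:
--             c+=consCount%1000000007
--             vowCount-=1
--         else:
--             c+=vowCount%1000000007
--             consCount-=1
--
--
--     return c%1000000007
-- ===== SOURCE B (Python) =====
-- def solve(A):
--     V = sum(1 for ch in A if ch in "aeiou")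
--     return (V * (len(A) - V)) % 1000000007
-- ===== Notes on version B (the rewrite author's own statement) =====
-- stated objective: simpler
-- what changed: Replaced the two stateful counting loops (the second decrementing counters per character) by a closed form: count vowels V in one pass and return V*(len-V) mod 1e9+7, since A's sum counts exactly the vowel-consonant position pairs.
import Mathlib
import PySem

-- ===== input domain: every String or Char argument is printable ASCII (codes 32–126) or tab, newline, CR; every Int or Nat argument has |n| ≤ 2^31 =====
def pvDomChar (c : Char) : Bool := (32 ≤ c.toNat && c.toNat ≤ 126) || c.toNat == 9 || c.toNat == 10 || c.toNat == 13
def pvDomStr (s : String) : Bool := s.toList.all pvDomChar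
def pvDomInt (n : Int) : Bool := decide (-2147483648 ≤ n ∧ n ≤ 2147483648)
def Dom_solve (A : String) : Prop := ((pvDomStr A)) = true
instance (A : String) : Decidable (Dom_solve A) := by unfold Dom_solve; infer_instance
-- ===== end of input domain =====

-- B replaces A's two stateful counting loops by the closed form V*(len-V) mod 1e9+7 (simpler; return value only).

-- ===== PORT A =====
def pvVowels : List Char := ['a','e','i','o','u']

def pvStep1 (p : Int × Int) (i : Char) : Int × Int :=
  if pvVowels.contains i then (p.1 + 1, p.2) else (p.1, p.2 + 1)

def pvStep2 (s : Int × Int × Int) (i : Char) : Int × Int × Int :=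
  if pvVowels.contains i then (s.1 + PySem.Int.mod s.2.2 1000000007, s.2.1 - 1, s.2.2)
  else (s.1 + PySem.Int.mod s.2.1 1000000007, s.2.1, s.2.2 - 1)

def solve (A : String) : Int :=
  let s1 := A.toList.foldl pvStep1 (0, 0)
  let s2 := A.toList.foldl pvStep2 (0, s1.1, s1.2)
  PySem.Int.mod s2.1 1000000007

-- ===== PORT B =====
def solve_alt (A : String) : Int :=
  let V : Int := ((A.toList.filter (fun ch => ("aeiou".toList).contains ch)).length : Int)
  PySem.Int.mod (V * (PySem.Str.len A - V)) 1000000007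

-- ===== PRECONDITION & SPEC =====
def Spec_solve (A : String) (out : Int) : Prop := out = solve_alt A
instance (A : String) (out : Int) : Decidable (Spec_solve A out) := by unfold Spec_solve; infer_instance

-- ===== CLAIM (what is proved, stated in full; the proofs are below) =====
def Claim_equal_solve : Prop := ∀ (A : String), Dom_solve A → Spec_solve A (solve A)

-- ===== LEMMAS AND PROOFS =====
def vcnt (l : List Char) : Int := (l.countP (fun c => pvVowels.contains c) : Int)
def ccnt (l : List Char) : Int := (l.countP (fun c => !pvVowels.contains c) : Int)

lemma loop1_eq : ∀ (l : List Char) (v c : Int), l.foldl pvStep1 (v, c) = (v + vcnt l, c + ccnt l) := by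
  intro l
  induction l with
  | nil => intro v c; simp [vcnt, ccnt]
  | cons h t ih =>
    intro v c
    by_cases hv : h ∈ pvVowels <;>
      simp [pvStep1, hv, ih, vcnt, ccnt] <;> omega

lemma loop2_modeq : ∀ (l : List Char) (c v k : Int),
    (l.foldl pvStep2 (c, v, k)).1 ≡
      c + vcnt l * k + ccnt l * v - vcnt l * ccnt l [ZMOD 1000000007] := by
  intro l
  induction l with
  | nil => intro c v k; simp [vcnt, ccnt]
  | cons h t ih =>
    intro c v k
    have hm : ∀ x : Int, PySem.Int.mod x 1000000007 ≡ x [ZMOD 1000000007] := by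
      intro x
      rw [PySem.Int.mod_eq_emod_of_pos (by norm_num)]
      exact Int.emod_emod_of_dvd x dvd_rfl
    by_cases hv : h ∈ pvVowels
    · have heq : (h :: t).foldl pvStep2 (c, v, k) =
          t.foldl pvStep2 (c + PySem.Int.mod k 1000000007, v - 1, k) := by
        simp [pvStep2, hv]
      rw [heq]
      refine (ih _ _ _).trans ?_
      have h2 : (c + PySem.Int.mod k 1000000007) + (vcnt t * k + ccnt t * (v - 1) - vcnt t * ccnt t)
          ≡ (c + k) + (vcnt t * k + ccnt t * (v - 1) - vcnt t * ccnt t) [ZMOD 1000000007] :=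
        Int.ModEq.add_right _ (Int.ModEq.add_left c (hm k))
      have hrw : c + vcnt (h :: t) * k + ccnt (h :: t) * v - vcnt (h :: t) * ccnt (h :: t)
          = (c + k) + (vcnt t * k + ccnt t * (v - 1) - vcnt t * ccnt t) := by
        simp [vcnt, ccnt, hv]; ring
      rw [hrw]
      calc c + PySem.Int.mod k 1000000007 + vcnt t * k + ccnt t * (v - 1) - vcnt t * ccnt t
          = (c + PySem.Int.mod k 1000000007) + (vcnt t * k + ccnt t * (v - 1) - vcnt t * ccnt t) := by ring
        _ ≡ (c + k) + (vcnt t * k + ccnt t * (v - 1) - vcnt t * ccnt t) [ZMOD 1000000007] := h2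
    · have heq : (h :: t).foldl pvStep2 (c, v, k) =
          t.foldl pvStep2 (c + PySem.Int.mod v 1000000007, v, k - 1) := by
        simp [pvStep2, hv]
      rw [heq]
      refine (ih _ _ _).trans ?_
      have h2 : (c + PySem.Int.mod v 1000000007) + (vcnt t * (k - 1) + ccnt t * v - vcnt t * ccnt t)
          ≡ (c + v) + (vcnt t * (k - 1) + ccnt t * v - vcnt t * ccnt t) [ZMOD 1000000007] :=
        Int.ModEq.add_right _ (Int.ModEq.add_left c (hm v))
      have hrw : c + vcnt (h :: t) * k + ccnt (h :: t) * v - vcnt (h :: t) * ccnt (h :: t)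
          = (c + v) + (vcnt t * (k - 1) + ccnt t * v - vcnt t * ccnt t) := by
        simp [vcnt, ccnt, hv]; ring
      rw [hrw]
      calc c + PySem.Int.mod v 1000000007 + vcnt t * (k - 1) + ccnt t * v - vcnt t * ccnt t
          = (c + PySem.Int.mod v 1000000007) + (vcnt t * (k - 1) + ccnt t * v - vcnt t * ccnt t) := by ring
        _ ≡ (c + v) + (vcnt t * (k - 1) + ccnt t * v - vcnt t * ccnt t) [ZMOD 1000000007] := h2

lemma ccnt_eq (l : List Char) : ccnt l = (l.length : Int) - vcnt l := by
  induction l with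
  | nil => simp [vcnt, ccnt]
  | cons h t ih =>
    by_cases hv : h ∈ pvVowels <;>
      simp [vcnt, ccnt, hv] at ih ⊢ <;> omega

-- ===== VERDICT (by name: the statement is the Claim_ definition above) =====
theorem solve_spec : Claim_equal_solve := by
  intro A _
  unfold Spec_solve solve solve_alt
  have hv : ("aeiou".toList).contains = fun c => pvVowels.contains c := by
    funext c; simp [pvVowels]
  rw [loop1_eq]
  have h := loop2_modeq A.toList 0 (0 + vcnt A.toList) (0 + ccnt A.toList)
  have hmodeq : (A.toList.foldl pvStep2 (0, 0 + vcnt A.toList, 0 + ccnt A.toList)).1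
      ≡ vcnt A.toList * ((A.toList.length : Int) - vcnt A.toList) [ZMOD 1000000007] := by
    have heq : (0:Int) + vcnt A.toList * (0 + ccnt A.toList) + ccnt A.toList * (0 + vcnt A.toList)
        - vcnt A.toList * ccnt A.toList = vcnt A.toList * ((A.toList.length : Int) - vcnt A.toList) := by
      rw [ccnt_eq]; ring
    exact heq ▸ h
  have hV : ((A.toList.filter (fun ch => ("aeiou".toList).contains ch)).length : Int) = vcnt A.toList := by
    rw [hv]; simp [vcnt, List.countP_eq_length_filter]
  rw [hV, PySem.Str.len_eq]
  rw [PySem.Int.mod_eq_emod_of_pos (by norm_num), PySem.Int.mod_eq_emod_of_pos (by norm_num)]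
  exact hmodeq
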